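-- pv_equiv track=rewrite | github.com/pypi-data/pypi-mirror-378 | packages/mdquery/mdquery-0.4.0.tar.gz/mdquery-0.4.0/mdquery/parsers/tags.py | expand_nested_tags
-- ===== SOURCE A (Python) =====
-- from typing import Any, Dict, List, Set, Union
--
-- def expand_nested_tags(tags: List[str]) -> List[str]:
--     """
--     Expand nested tags to include parent tags.
--
--     For example, 'programming/python' becomes ['programming', 'programming/python']
--
--     Args:
--         tags: List of tag strings
--
--     Returns:
--         Expanded list including parent tags
--     """
--     expanded = set(tags)
--
--     for tag in tags:
--         if '/' in tag:
--             parts = tag.split('/')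
--             # Add all parent paths
--             for i in range(1, len(parts)):
--                 parent_tag = '/'.join(parts[:i])
--                 if parent_tag:
--                     expanded.add(parent_tag)
--
--     return sorted(list(expanded))
-- ===== SOURCE B (Python) =====
-- def expand_nested_tags(tags):
--     """Expand nested tags: one left-to-right character scan per tag; every
--     position holding '/' (except position 0) marks a parent prefix tag[:i]."""
--     expanded = set(tags)
--     for tag in tags:
--         for i, ch in enumerate(tag):
--             if ch == '/' and i > 0:
--                 expanded.add(tag[:i])
--     return sorted(expanded)
-- ===== Notes on version B (the rewrite author's own statement) =====
-- stated objective: alternative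
-- what changed: Replaces split('/') + an index loop re-joining parts[:i] with a single left-to-right character scan that adds tag[:i] at every non-initial '/' position, so no part lists are built and no joins are performed.
import Mathlib
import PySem

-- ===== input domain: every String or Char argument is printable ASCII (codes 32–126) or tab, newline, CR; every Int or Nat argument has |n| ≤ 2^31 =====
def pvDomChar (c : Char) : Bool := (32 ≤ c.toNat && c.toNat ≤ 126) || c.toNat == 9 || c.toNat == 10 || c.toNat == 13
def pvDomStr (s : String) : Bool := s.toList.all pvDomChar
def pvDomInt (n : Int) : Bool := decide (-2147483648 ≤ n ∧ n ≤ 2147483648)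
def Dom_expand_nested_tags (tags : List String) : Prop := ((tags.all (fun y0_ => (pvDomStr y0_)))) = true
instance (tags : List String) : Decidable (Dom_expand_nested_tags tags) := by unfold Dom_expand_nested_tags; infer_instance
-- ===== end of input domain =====

-- B replaces A's split('/') + prefix re-joining with a single character scan per tag
-- that adds tag[:i] at every non-initial '/' position (objective: alternative).

-- ===== PORT A =====
-- A's loop body (the work done for one tag), named so the outer fold stays readable.
def expandA_inner (expanded : PySem.Set String) (tag : String) : PySem.Set String :=
  if PySem.Str.isIn "/" tag then
    let parts := (PySem.Str.split? tag "/").getD []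
    (PySem.List.pyRange 1 (parts.length : Int)).foldl
      (fun expanded i =>
        let parent_tag := PySem.Str.join "/" (PySem.List.slice parts none (some i))
        if parent_tag ≠ "" then PySem.Set.add expanded parent_tag else expanded)
      expanded
  else expanded

def expand_nested_tags (tags : List String) : List String :=
  let expanded : PySem.Set String := PySem.Set.ofList tags
  let expanded := tags.foldl expandA_inner expanded
  PySem.List.sorted expanded (fun x => x) false

-- ===== PORT B =====
-- B's loop body: scan the characters of one tag with enumerate; tag[:i] is added at
-- every '/' found at a position i > 0.
def expandB_inner (expanded : PySem.Set String) (tag : String) : PySem.Set String :=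
  (PySem.List.enumerate tag.toList).foldl
    (fun expanded p =>
      if p.2 = '/' ∧ 0 < p.1 then PySem.Set.add expanded (PySem.Str.slice tag none (some p.1))
      else expanded)
    expanded

def expand_nested_tags_alt (tags : List String) : List String :=
  let expanded := tags.foldl expandB_inner (PySem.Set.ofList tags)
  PySem.List.sorted expanded (fun x => x) false

-- ===== PRECONDITION & SPEC =====
def Spec_expand_nested_tags (tags : List String) (out : List String) : Prop := out = expand_nested_tags_alt tags
instance (tags : List String) (out : List String) : Decidable (Spec_expand_nested_tags tags out) := by unfold Spec_expand_nested_tags; infer_instance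

-- ===== CLAIM (what is proved, stated in full; the proofs are below) =====
def Claim_equal_expand_nested_tags : Prop := ∀ (tags : List String), Dom_expand_nested_tags tags → Spec_expand_nested_tags tags (expand_nested_tags tags)

-- ===== LEMMAS AND PROOFS =====

-- structural reference version of s.split('/') on char lists
def sS : List Char → List (List Char)
  | [] => [[]]
  | c :: rest =>
    if c = '/' then [] :: sS rest
    else
      match sS rest with
      | [] => [[c]]
      | h :: t => (c :: h) :: t

-- structural reference version of '/'.join on char lists
def jS : List (List Char) → List Char
  | [] => []
  | [a] => a
  | a :: b :: t => a ++ '/' :: jS (b :: t)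

lemma sS_ne_nil (cs : List Char) : sS cs ≠ [] := by
  cases cs with
  | nil => simp [sS]
  | cons c rest =>
    simp only [sS]
    split
    · simp
    · cases h : sS rest <;> simp

lemma jS_nil_cons (b : List Char) (t : List (List Char)) :
    jS ([] :: b :: t) = '/' :: jS (b :: t) := rfl

lemma jS_cons (c : Char) (h : List Char) (t : List (List Char)) :
    jS ((c :: h) :: t) = c :: jS (h :: t) := by
  cases t with
  | nil => rfl
  | cons b t => simp [jS]

lemma splitOn_go_eq (cs : List Char) : ∀ (fuel : Nat), cs.length < fuel →
    ∀ (cur : List Char) (acc : List (List Char)),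
    PySem.Chars.splitOn.go ['/'] fuel cs cur acc =
      acc.reverse ++ (match sS cs with
        | [] => [cur.reverse]
        | h :: t => (cur.reverse ++ h) :: t) := by
  induction cs with
  | nil =>
    intro fuel hf cur acc
    obtain ⟨f, rfl⟩ : ∃ f, fuel = f + 1 := ⟨fuel - 1, by omega⟩
    rw [PySem.Chars.splitOn.go.eq_def]
    simp [sS]
  | cons c rest ih =>
    intro fuel hf cur acc
    obtain ⟨f, rfl⟩ : ∃ f, fuel = f + 1 := ⟨fuel - 1, by omega⟩
    rw [PySem.Chars.splitOn.go.eq_def]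
    simp only []
    by_cases hc : c = '/'
    · subst hc
      have hp : (['/'] : List Char).isPrefixOf ('/' :: rest) = true := by
        simp [List.isPrefixOf]
      rw [if_pos hp]
      have hd : List.drop (['/'] : List Char).length ('/' :: rest) = rest := rfl
      rw [hd]
      simp only [List.length_cons] at hf
      rw [ih f (by omega) [] (cur.reverse :: acc)]
      rcases hs : sS rest with _ | ⟨h, t⟩
      · exact absurd hs (sS_ne_nil rest)
      · simp [sS, hs]
    · have hp : (['/'] : List Char).isPrefixOf (c :: rest) = false := by
        simp [List.isPrefixOf]
        intro h; exact absurd h.symm hc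
      rw [if_neg (by simp [hp])]
      simp only [List.length_cons] at hf
      rw [ih f (by omega) (c :: cur) acc]
      rcases hs : sS rest with _ | ⟨h, t⟩
      · exact absurd hs (sS_ne_nil rest)
      · simp [sS, hc, hs, List.append_assoc]

lemma splitOn_slash (cs : List Char) : PySem.Chars.splitOn cs ['/'] = sS cs := by
  show PySem.Chars.splitOn.go ['/'] (cs.length + 1) cs [] [] = sS cs
  rw [splitOn_go_eq cs (cs.length + 1) (by omega) [] []]
  rcases hs : sS cs with _ | ⟨h, t⟩
  · exact absurd hs (sS_ne_nil cs)
  · simp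

lemma join_eq (ls : List (List Char)) : PySem.Chars.join ['/'] ls = jS ls := by
  show List.intercalate ['/'] ls = jS ls
  induction ls with
  | nil => simp [jS, List.intercalate]
  | cons a t ih =>
    cases t with
    | nil => simp [jS, List.intercalate]
    | cons b t' =>
      simp only [jS, ← ih]
      simp [List.intercalate]

-- the heart: A's '/'-joined proper prefixes of split('/') are exactly B's
-- prefixes cut at a '/' position
lemma take_sS_ne_nil (rest : List Char) (i : Nat) (h1 : 1 ≤ i)
    (hs : (sS rest).take i = []) : False := by
  rcases List.take_eq_nil_iff.mp hs with h | h
  · omega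
  · exact absurd h (sS_ne_nil rest)

-- the heart: A's '/'-joined proper prefixes of split('/') are exactly B's
-- prefixes cut at a '/' position
lemma core (cs : List Char) : ∀ (x : List Char),
    (∃ i : Nat, 1 ≤ i ∧ i < (sS cs).length ∧ x = jS ((sS cs).take i))
      ↔ (∃ j : Nat, j < cs.length ∧ cs[j]? = some '/' ∧ x = cs.take j) := by
  induction cs with
  | nil =>
    intro x
    constructor
    · rintro ⟨i, h1, h2, _⟩; simp [sS] at h2; omega
    · rintro ⟨j, hj, _⟩; simp at hj
  | cons c rest ih =>
    intro x
    have hpos := List.length_pos_iff.mpr (sS_ne_nil rest)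
    by_cases hc : c = '/'
    · subst hc
      have hsS : sS ('/' :: rest) = [] :: sS rest := by simp [sS]
      constructor
      · rintro ⟨i, h1, h2, rfl⟩
        rw [hsS] at h2 ⊢
        simp only [List.length_cons] at h2
        match i, h1 with
        | 1, _ =>
          exact ⟨0, by simp, by simp, by simp [jS]⟩
        | (i' + 2), _ =>
          have h1' : 1 ≤ i' + 1 := by omega
          have h2' : i' + 1 < (sS rest).length := by omega
          obtain ⟨j', hj', hg', hx'⟩ :=
            (ih (jS ((sS rest).take (i' + 1)))).mp ⟨i' + 1, h1', h2', rfl⟩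
          refine ⟨j' + 1, by simp only [List.length_cons]; omega, by simpa using hg', ?_⟩
          rw [List.take_succ_cons, List.take_succ_cons]
          cases hs : (sS rest).take (i' + 1) with
          | nil => exact absurd hs (fun h => take_sS_ne_nil rest _ h1' h)
          | cons a b =>
            rw [hs] at hx'
            rw [jS_nil_cons, hx']
      · rintro ⟨j, hj, hg, rfl⟩
        rw [hsS]
        cases j with
        | zero =>
          exact ⟨1, le_refl 1, by simp only [List.length_cons]; omega, by simp [jS]⟩
        | succ j' =>
          simp only [List.length_cons] at hj
          simp only [List.getElem?_cons_succ] at hg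
          obtain ⟨i', h1', h2', hx'⟩ :=
            (ih (rest.take j')).mpr ⟨j', by omega, hg, rfl⟩
          refine ⟨i' + 1, by omega, by simp only [List.length_cons]; omega, ?_⟩
          rw [List.take_succ_cons, List.take_succ_cons]
          cases hs : (sS rest).take i' with
          | nil => exact absurd hs (fun h => take_sS_ne_nil rest _ h1' h)
          | cons a b =>
            rw [hs] at hx'
            rw [jS_nil_cons, hx']
    · obtain ⟨h, t, hs⟩ : ∃ h t, sS rest = h :: t := by
        cases hs : sS rest with
        | nil => exact absurd hs (sS_ne_nil rest)
        | cons a b => exact ⟨a, b, rfl⟩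
      have hsS : sS (c :: rest) = (c :: h) :: t := by simp [sS, hc, hs]
      have hlen : (sS (c :: rest)).length = (sS rest).length := by rw [hsS, hs]; simp
      have hx : ∀ i : Nat, 1 ≤ i →
          jS ((sS (c :: rest)).take i) = c :: jS ((sS rest).take i) := by
        intro i h1
        rw [hsS, hs]
        match i, h1 with
        | (k + 1), _ => rw [List.take_succ_cons, List.take_succ_cons, jS_cons]
      constructor
      · rintro ⟨i, h1, h2, rfl⟩
        rw [hlen] at h2
        obtain ⟨j', hj', hg', hx'⟩ :=
          (ih (jS ((sS rest).take i))).mp ⟨i, h1, h2, rfl⟩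
        refine ⟨j' + 1, by simp only [List.length_cons]; omega, by simpa using hg', ?_⟩
        rw [hx i h1, List.take_succ_cons, hx']
      · rintro ⟨j, hj, hg, rfl⟩
        cases j with
        | zero =>
          simp only [List.getElem?_cons_zero] at hg
          exact absurd (Option.some.inj hg) hc
        | succ j' =>
          simp only [List.length_cons] at hj
          simp only [List.getElem?_cons_succ] at hg
          obtain ⟨i', h1', h2', hx'⟩ :=
            (ih (rest.take j')).mpr ⟨j', by omega, hg, rfl⟩
          refine ⟨i', h1', by omega, ?_⟩
          rw [hx i' h1', List.take_succ_cons, ← hx']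

-- membership through a conditional-add loop
lemma mem_foldl_add_if {β : Type} (l : List β) (P : β → Prop) [DecidablePred P]
    (f : β → String) (s : PySem.Set String) (x : String) :
    x ∈ l.foldl (fun ex b => if P b then PySem.Set.add ex (f b) else ex) s
      ↔ x ∈ s ∨ ∃ b ∈ l, P b ∧ x = f b := by
  induction l generalizing s with
  | nil => simp
  | cons b t ih =>
    simp only [List.foldl_cons]
    by_cases h : P b
    · rw [if_pos h, ih]
      constructor
      · rintro (hx | ⟨b', hb', hp, rfl⟩)
        · rcases (PySem.Set.mem_add s (f b) x).mp hx with hx | rfl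
          · exact Or.inl hx
          · exact Or.inr ⟨b, List.mem_cons_self, h, rfl⟩
        · exact Or.inr ⟨b', List.mem_cons_of_mem _ hb', hp, rfl⟩
      · rintro (hx | ⟨b', hb', hp, rfl⟩)
        · exact Or.inl ((PySem.Set.mem_add s (f b) x).mpr (Or.inl hx))
        · rcases List.mem_cons.mp hb' with rfl | hb'
          · exact Or.inl ((PySem.Set.mem_add s (f b') (f b')).mpr (Or.inr rfl))
          · exact Or.inr ⟨b', hb', hp, rfl⟩
    · rw [if_neg h, ih]
      constructor
      · rintro (hx | ⟨b', hb', hp, rfl⟩)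
        · exact Or.inl hx
        · exact Or.inr ⟨b', List.mem_cons_of_mem _ hb', hp, rfl⟩
      · rintro (hx | ⟨b', hb', hp, rfl⟩)
        · exact Or.inl hx
        · rcases List.mem_cons.mp hb' with rfl | hb'
          · exact absurd hp h
          · exact Or.inr ⟨b', hb', hp, rfl⟩

lemma nodup_foldl_add_if {β : Type} (l : List β) (P : β → Prop) [DecidablePred P]
    (f : β → String) (s : PySem.Set String) (hs : s.Nodup) :
    (l.foldl (fun ex b => if P b then PySem.Set.add ex (f b) else ex) s).Nodup := by
  induction l generalizing s with
  | nil => exact hs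
  | cons b t ih =>
    simp only [List.foldl_cons]
    by_cases h : P b
    · rw [if_pos h]; exact ih _ (PySem.Set.nodup_add _ _ hs)
    · rw [if_neg h]; exact ih _ hs

-- the common per-tag "emitted parents" predicate
def PE (t x : String) : Prop :=
  x ≠ "" ∧ ∃ j : Nat, j < t.toList.length ∧ t.toList[j]? = some '/' ∧ x.toList = t.toList.take j

lemma A_inner_mem (ex : PySem.Set String) (t x : String) :
    x ∈ expandA_inner ex t ↔ x ∈ ex ∨ PE t x := by
  have hl : ("/" : String).toList = ['/'] := by decide
  unfold expandA_inner
  by_cases hin : PySem.Str.isIn "/" t = true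
  · rw [if_pos hin]
    obtain ⟨ps, hps, hmap⟩ : ∃ ps, PySem.Str.split? t "/" = some ps ∧
        ps.map String.toList = sS t.toList := by
      have h := PySem.Str.split?_map t "/"
      rw [hl] at h
      cases hsp : PySem.Str.split? t "/" with
      | none =>
        rw [hsp] at h
        simp [PySem.Chars.split?] at h
      | some ps =>
        rw [hsp] at h
        refine ⟨ps, rfl, ?_⟩
        have h2 : PySem.Chars.split? t.toList ['/'] =
            some (PySem.Chars.splitOn t.toList ['/']) := by
          simp [PySem.Chars.split?]
        rw [h2, splitOn_slash] at h
        simpa using h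
    have hlen : ps.length = (sS t.toList).length := by
      rw [← hmap, List.length_map]
    simp only [hps, Option.getD_some]
    rw [mem_foldl_add_if (PySem.List.pyRange 1 (ps.length : Int))
      (fun i => PySem.Str.join "/" (PySem.List.slice ps none (some i)) ≠ "")
      (fun i => PySem.Str.join "/" (PySem.List.slice ps none (some i)))]
    have hjoin : ∀ n : Nat,
        (PySem.Str.join "/" (ps.take n)).toList = jS ((sS t.toList).take n) := by
      intro n
      rw [PySem.Str.toList_join, List.map_take, hmap, hl]
      exact join_eq _
    constructor
    · rintro (hx | ⟨i, hi, hne, rfl⟩)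
      · exact Or.inl hx
      · right
        rw [PySem.List.mem_pyRange_one] at hi
        rw [PySem.List.slice_to ps (by omega)] at hne ⊢
        have h1 : 1 ≤ i.toNat := by omega
        have h2 : i.toNat < (sS t.toList).length := by omega
        obtain ⟨j, hj, hg, hx⟩ :=
          (core t.toList ((PySem.Str.join "/" (ps.take i.toNat)).toList)).mp
            ⟨i.toNat, h1, h2, hjoin i.toNat⟩
        exact ⟨hne, j, hj, hg, hx⟩
    · rintro (hx | ⟨hne, j, hj, hg, hx⟩)
      · exact Or.inl hx
      · right
        obtain ⟨i, h1, h2, hxl⟩ := (core t.toList x.toList).mpr ⟨j, hj, hg, hx⟩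
        refine ⟨(i : Int), ?_, ?_, ?_⟩
        · rw [PySem.List.mem_pyRange_one]; omega
        · rw [PySem.List.slice_to ps (by omega), Int.toNat_natCast]
          intro h
          apply hne
          rw [← String.toList_inj, hxl, ← hjoin i, h]
        · rw [PySem.List.slice_to ps (by omega), Int.toNat_natCast,
            ← String.toList_inj, hjoin i, hxl]
  · rw [if_neg hin]
    constructor
    · exact Or.inl
    · rintro (hx | ⟨hne, j, hj, hg, hx⟩)
      · exact hx
      · exfalso
        apply hin
        rw [PySem.Str.isIn_iff_infix, hl]
        refine (List.singleton_infix_iff '/' t.toList).mpr ?_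
        obtain ⟨h', he⟩ := List.getElem?_eq_some_iff.mp hg
        rw [← he]
        exact List.getElem_mem h'

lemma B_inner_mem (ex : PySem.Set String) (t x : String) :
    x ∈ expandB_inner ex t ↔ x ∈ ex ∨ PE t x := by
  unfold expandB_inner
  rw [mem_foldl_add_if (PySem.List.enumerate t.toList)
    (fun p => p.2 = '/' ∧ 0 < p.1)
    (fun p => PySem.Str.slice t none (some p.1))]
  have hslice : ∀ k : Nat,
      (PySem.Str.slice t none (some (k : Int))).toList = t.toList.take k := by
    intro k
    rw [PySem.Str.toList_slice]
    show PySem.List.slice t.toList none (some (k : Int)) = _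
    rw [PySem.List.slice_to _ (by omega), Int.toNat_natCast]
  constructor
  · rintro (hx | ⟨p, hp, ⟨hc, hpos⟩, rfl⟩)
    · exact Or.inl hx
    · right
      obtain ⟨k, hk, rfl⟩ := (PySem.List.mem_enumerate_iff t.toList 0 p).mp hp
      simp only [zero_add] at hc hpos ⊢
      refine ⟨?_, k, hk, ?_, ?_⟩
      · intro hEq
        have h2 : t.toList.take k = [] := by rw [← hslice k, hEq]; rfl
        rcases List.take_eq_nil_iff.mp h2 with h | h
        · omega
        · rw [h] at hk; simp at hk
      · rw [List.getElem?_eq_getElem hk, hc]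
      · exact hslice k
  · rintro (hx | ⟨hne, j, hj, hg, hx⟩)
    · exact Or.inl hx
    · right
      refine ⟨((j : Int), '/'), ?_, ⟨rfl, ?_⟩, ?_⟩
      · rw [PySem.List.mem_enumerate_iff]
        refine ⟨j, hj, ?_⟩
        rw [List.getElem?_eq_getElem hj] at hg
        simp [Option.some.inj hg]
      · have hj0 : j ≠ 0 := by
          intro h
          subst h
          simp only [List.take_zero] at hx
          exact hne (String.toList_eq_nil_iff.mp hx)
        simp only []
        omega
      · simp only []
        rw [← String.toList_inj, hslice j, hx]

lemma A_inner_nodup (ex : PySem.Set String) (t : String) (h : ex.Nodup) :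
    (expandA_inner ex t).Nodup := by
  unfold expandA_inner
  split
  · exact nodup_foldl_add_if _ _ _ _ h
  · exact h

lemma B_inner_nodup (ex : PySem.Set String) (t : String) (h : ex.Nodup) :
    (expandB_inner ex t).Nodup := by
  unfold expandB_inner
  exact nodup_foldl_add_if _ _ _ _ h

lemma mem_foldl_outer (G : PySem.Set String → String → PySem.Set String)
    (em : String → String → Prop)
    (hG : ∀ ex t x, x ∈ G ex t ↔ x ∈ ex ∨ em t x)
    (l : List String) : ∀ (s : PySem.Set String) (x : String),
    x ∈ l.foldl G s ↔ x ∈ s ∨ ∃ t ∈ l, em t x := by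
  induction l with
  | nil => intro s x; simp
  | cons t ts ih =>
    intro s x
    simp only [List.foldl_cons, ih, hG]
    constructor
    · rintro ((h | h) | ⟨u, hu, h⟩)
      · exact Or.inl h
      · exact Or.inr ⟨t, List.mem_cons_self, h⟩
      · exact Or.inr ⟨u, List.mem_cons_of_mem _ hu, h⟩
    · rintro (h | ⟨u, hu, h⟩)
      · exact Or.inl (Or.inl h)
      · rcases List.mem_cons.mp hu with rfl | hu
        · exact Or.inl (Or.inr h)
        · exact Or.inr ⟨u, hu, h⟩

lemma nodup_foldl_outer (G : PySem.Set String → String → PySem.Set String)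
    (hG : ∀ ex t, ex.Nodup → (G ex t).Nodup)
    (l : List String) : ∀ (s : PySem.Set String), s.Nodup → (l.foldl G s).Nodup := by
  induction l with
  | nil => exact fun s hs => hs
  | cons t ts ih => exact fun s hs => ih _ (hG _ _ hs)

-- ===== VERDICT (by name: the statement is the Claim_ definition above) =====
theorem expand_nested_tags_spec : Claim_equal_expand_nested_tags := by
  intro tags _
  unfold Spec_expand_nested_tags expand_nested_tags expand_nested_tags_alt
  apply PySem.List.sorted_eq_sorted_of_perm _ _ _ (fun a b h => h)
  rw [List.perm_ext_iff_of_nodup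
    (nodup_foldl_outer _ A_inner_nodup _ _ (PySem.Set.nodup_ofList tags))
    (nodup_foldl_outer _ B_inner_nodup _ _ (PySem.Set.nodup_ofList tags))]
  intro x
  rw [mem_foldl_outer _ PE A_inner_mem, mem_foldl_outer _ PE B_inner_mem]
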